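-- pv_equiv track=rewrite | github.com/SaiShanmukkha/Image-Encryption---JPMCM | Lib/JS_Mapping.py | JS_generate_column_sequence
-- ===== SOURCE A (Python) =====
-- def JS_generate_column_sequence(M,N, NP, NStep):
--     tmp = NP - 1
--     ns = NStep
--     col_lst = []
--     for _ in range(M):
--         i = tmp
--         b = list(range(N))
--         ci = []
--         for k in range(1, N+1):
--             ci.append(b[i])
--             b.pop(i)
--             if len(b) == 0:
--                 NStep += 1
--                 break
--             i = ((i-1) + NStep) % (N-k)
--             NStep += 1
--         tmp = ci[k-1] - 1
--         col_lst.append(ci)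
--     return col_lst
-- ===== SOURCE B (Python) =====
-- def _build(lo, hi):
--     # order-statistics segment tree over values lo..hi-1: [aliveCount, value, left, right]
--     if hi - lo == 1:
--         return [1, lo, None, None]
--     mid = (lo + hi) // 2
--     l = _build(lo, mid)
--     r = _build(mid, hi)
--     return [l[0] + r[0], 0, l, r]
--
-- def _select_remove(t, k):
--     # pick the k-th (0-indexed) alive value and mark it removed; O(log N)
--     t[0] -= 1
--     if t[2] is None:
--         return t[1]
--     if k < t[2][0]:
--         return _select_remove(t[2], k)
--     return _select_remove(t[3], k - t[2][0])
--
-- def JS_generate_column_sequence(M, N, NP, NStep):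
--     col_lst = []
--     tmp = NP - 1
--     for r in range(M):
--         base = NStep + r * N          # NStep's value when this row starts
--         tree = _build(0, N)
--         i = tmp
--         ci = []
--         for k in range(1, N + 1):
--             ci.append(_select_remove(tree, i % (N - k + 1)))
--             if k < N:
--                 i = (i - 1 + base + (k - 1)) % (N - k)
--         tmp = ci[-1] - 1
--         col_lst.append(ci)
--     return col_lst
-- ===== Notes on version B (the rewrite author's own statement) =====
-- stated objective: alternative
-- what changed: Replaces the per-row list simulation with repeated list.pop(i) by an order-statistics segment tree (select-and-remove the i-th survivor in O(log N)) and replaces the threaded NStep mutation by the closed-form per-row offset NStep + r*N.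
import Mathlib
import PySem

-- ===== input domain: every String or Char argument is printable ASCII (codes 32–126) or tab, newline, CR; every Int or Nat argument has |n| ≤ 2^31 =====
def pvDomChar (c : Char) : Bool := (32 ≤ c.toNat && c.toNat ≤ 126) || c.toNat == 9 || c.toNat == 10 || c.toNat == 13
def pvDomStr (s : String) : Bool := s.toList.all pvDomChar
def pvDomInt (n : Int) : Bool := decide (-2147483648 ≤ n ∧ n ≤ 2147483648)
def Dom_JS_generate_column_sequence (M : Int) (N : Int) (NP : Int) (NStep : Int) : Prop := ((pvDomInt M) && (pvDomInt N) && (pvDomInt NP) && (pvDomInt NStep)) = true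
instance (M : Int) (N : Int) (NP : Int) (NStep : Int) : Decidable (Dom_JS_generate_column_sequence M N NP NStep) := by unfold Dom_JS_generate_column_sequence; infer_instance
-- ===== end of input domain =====

-- B replaces A's repeated list.pop(i) simulation by an order-statistics segment tree with a
-- closed-form per-row step offset (alternative algorithm; equivalence of return values proved).

-- ===== PORT A =====
-- inner 'for k in range(1, N+1)' loop with its break; state (b, ci, i, NStep, last k);
-- returns (ci, NStep, k).  The 'none' arms are Python's IndexError (excluded by Pre_).
def rowA (N : Int) : List Int → List Int → List Int → Int → Int → Int → List Int × Int × Int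
  | [], _b, ci, _i, ns, kl => (ci, ns, kl)
  | k :: ks, b, ci, i, ns, kl =>
    match PySem.List.pyGet? b i with
    | none => (ci, ns, kl)
    | some v =>
      match PySem.List.pop? b i with
      | none => (ci ++ [v], ns, kl)
      | some p =>
        if PySem.List.len p.2 = 0 then (ci ++ [v], ns + 1, k)
        else rowA N ks p.2 (ci ++ [v]) (PySem.Int.mod ((i - 1) + ns) (N - k)) (ns + 1) k

-- body of 'for _ in range(M)': state (tmp, NStep, col_lst)
def outerA (N : Int) (st : Int × Int × List (List Int)) (_r : Int) : Int × Int × List (List Int) :=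
  let b := PySem.List.pyRange 0 N 1
  let r := rowA N (PySem.List.pyRange 1 (N + 1) 1) b [] st.1 st.2.1 0
  (PySem.List.pyGetD r.1 (r.2.2 - 1) 0 - 1, r.2.1, st.2.2 ++ [r.1])

def JS_generate_column_sequence (M : Int) (N : Int) (NP : Int) (NStep : Int) : List (List Int) :=
  ((PySem.List.pyRange 0 M 1).foldl (outerA N) (NP - 1, NStep, [])).2.2

-- ===== PORT B =====
-- order-statistics segment tree: leaf (aliveCount, value) / node (aliveCount, l, r)
inductive OST where
  | leaf : Int → Int → OST
  | node : Int → OST → OST → OST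

def OST.count : OST → Int
  | .leaf c _ => c
  | .node c _ _ => c

-- _build(lo, hi); the 'hi - lo ≤ 0' guard only totalizes (Python would recurse forever there;
-- B never calls it that way under Pre_)
def buildOST (lo hi : Int) : OST :=
  if hi - lo ≤ 0 then .leaf 0 lo
  else if hi - lo = 1 then .leaf 1 lo
  else
    let mid := PySem.Int.floordiv (lo + hi) 2
    let l := buildOST lo mid
    let r := buildOST mid hi
    .node (l.count + r.count) l r
termination_by (hi - lo).toNat
decreasing_by
  · have h1 : lo + 1 ≤ PySem.Int.floordiv (lo + hi) 2 :=
      (PySem.Int.le_floordiv_iff_mul_le (by omega)).2 (by omega)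
    have h2 : PySem.Int.floordiv (lo + hi) 2 < hi :=
      (PySem.Int.floordiv_lt_iff_lt_mul (by omega)).2 (by omega)
    omega
  · have h1 : lo + 1 ≤ PySem.Int.floordiv (lo + hi) 2 :=
      (PySem.Int.le_floordiv_iff_mul_le (by omega)).2 (by omega)
    have h2 : PySem.Int.floordiv (lo + hi) 2 < hi :=
      (PySem.Int.floordiv_lt_iff_lt_mul (by omega)).2 (by omega)
    omega

-- _select_remove(t, k): value of the k-th alive leaf, tree with that leaf removed
def selRem : OST → Int → Int × OST
  | .leaf c v, _ => (v, .leaf (c - 1) v)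
  | .node c l r, k =>
    if k < l.count then
      let p := selRem l k
      (p.1, .node (c - 1) p.2 r)
    else
      let p := selRem r (k - l.count)
      (p.1, .node (c - 1) l p.2)

-- body of B's inner 'for k in range(1, N+1)': state (tree, ci, i)
def rowBstep (N base : Int) (st : OST × List Int × Int) (k : Int) : OST × List Int × Int :=
  let p := selRem st.1 (PySem.Int.mod st.2.2 (N - k + 1))
  (p.2, st.2.1 ++ [p.1],
    if k < N then PySem.Int.mod ((st.2.2 - 1) + base + (k - 1)) (N - k) else st.2.2)

-- body of B's 'for r in range(M)': state (tmp, col_lst)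
def outerB (N NStep : Int) (st : Int × List (List Int)) (r : Int) : Int × List (List Int) :=
  let base := NStep + r * N
  let res := (PySem.List.pyRange 1 (N + 1) 1).foldl (rowBstep N base) (buildOST 0 N, [], st.1)
  (PySem.List.pyGetD res.2.1 (-1) 0 - 1, st.2 ++ [res.2.1])

def JS_generate_column_sequence_alt (M : Int) (N : Int) (NP : Int) (NStep : Int) : List (List Int) :=
  ((PySem.List.pyRange 0 M 1).foldl (outerB N NStep) (NP - 1, [])).2

-- ===== PRECONDITION & SPEC =====
-- When M > 0, A raises unless N ≥ 1 (b[i] on an empty list / NameError on k) and the first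
-- start index NP-1 is a valid Python index into the N columns; exactly those inputs are excluded.
def Pre_JS_generate_column_sequence (M : Int) (N : Int) (NP : Int) (NStep : Int) : Prop :=
  M ≤ 0 ∨ (1 ≤ N ∧ -N ≤ NP - 1 ∧ NP - 1 < N)
instance (M : Int) (N : Int) (NP : Int) (NStep : Int) : Decidable (Pre_JS_generate_column_sequence M N NP NStep) := by unfold Pre_JS_generate_column_sequence; infer_instance

def pvWitness_JS_generate_column_sequence : Int × Int × Int × Int := (2, 5, 3, 2)

def Spec_JS_generate_column_sequence (M : Int) (N : Int) (NP : Int) (NStep : Int) (out : List (List Int)) : Prop := out = JS_generate_column_sequence_alt M N NP NStep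
instance (M : Int) (N : Int) (NP : Int) (NStep : Int) (out : List (List Int)) : Decidable (Spec_JS_generate_column_sequence M N NP NStep out) := by unfold Spec_JS_generate_column_sequence; infer_instance

-- ===== CLAIM (what is proved, stated in full; the proofs are below) =====
def Claim_equal_JS_generate_column_sequence : Prop := ∀ (M : Int) (N : Int) (NP : Int) (NStep : Int), Dom_JS_generate_column_sequence M N NP NStep → Pre_JS_generate_column_sequence M N NP NStep → Spec_JS_generate_column_sequence M N NP NStep (JS_generate_column_sequence M N NP NStep)

-- ===== LEMMAS AND PROOFS =====

-- the list of still-alive values of a tree, left to right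
def OST.alive : OST → List Int
  | .leaf c v => if c = 1 then [v] else []
  | .node _ l r => l.alive ++ r.alive

-- well-formedness: every count is the number of alive leaves below
def OST.wf : OST → Prop
  | .leaf c _ => c = 0 ∨ c = 1
  | .node c l r => c = l.count + r.count ∧ l.wf ∧ r.wf

@[simp] lemma OST_count_leaf (c v : Int) : (OST.leaf c v).count = c := rfl
@[simp] lemma OST_count_node (c : Int) (l r : OST) : (OST.node c l r).count = c := rfl
@[simp] lemma OST_alive_leaf (c v : Int) : (OST.leaf c v).alive = if c = 1 then [v] else [] := rfl
@[simp] lemma OST_alive_node (c : Int) (l r : OST) : (OST.node c l r).alive = l.alive ++ r.alive := rfl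
lemma OST_wf_leaf (c v : Int) : (OST.leaf c v).wf ↔ (c = 0 ∨ c = 1) := Iff.rfl
lemma OST_wf_node (c : Int) (l r : OST) :
    (OST.node c l r).wf ↔ (c = l.count + r.count ∧ l.wf ∧ r.wf) := Iff.rfl

lemma count_eq_alive_length : ∀ (t : OST), t.wf → t.count = (t.alive.length : Int) := by
  intro t h
  induction t with
  | leaf c v => rcases (OST_wf_leaf c v).1 h with h | h <;> simp [h]
  | node c l r ihl ihr =>
    obtain ⟨hc, hl, hr⟩ := (OST_wf_node c l r).1 h
    simp [hc, ihl hl, ihr hr]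

lemma build_spec : ∀ (n : Nat) (lo hi : Int), (hi - lo).toNat = n → lo < hi →
    (buildOST lo hi).wf ∧ (buildOST lo hi).alive = PySem.List.pyRange lo hi 1 := by
  intro n
  induction n using Nat.strong_induction_on with
  | _ n ih =>
    intro lo hi hn hlt
    rw [buildOST]
    by_cases h1 : hi - lo ≤ 0
    · omega
    · by_cases h2 : hi - lo = 1
      · have : hi = lo + 1 := by omega
        subst this
        simp only [h2, if_true]
        exact ⟨(OST_wf_leaf 1 lo).2 (Or.inr rfl), by
          simp [PySem.List.pyRange_one_singleton]⟩
      · have hm1 : lo + 1 ≤ PySem.Int.floordiv (lo + hi) 2 :=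
          (PySem.Int.le_floordiv_iff_mul_le (by omega)).2 (by omega)
        have hm2 : PySem.Int.floordiv (lo + hi) 2 < hi :=
          (PySem.Int.floordiv_lt_iff_lt_mul (by omega)).2 (by omega)
        set mid := PySem.Int.floordiv (lo + hi) 2 with hmid
        have hL := ih (mid - lo).toNat (by omega) lo mid rfl (by omega)
        have hR := ih (hi - mid).toNat (by omega) mid hi rfl (by omega)
        simp only [h1, h2, if_false]
        refine ⟨(OST_wf_node _ _ _).2 ⟨rfl, hL.1, hR.1⟩, ?_⟩
        simp only [OST_alive_node]
        rw [hL.2, hR.2, ← PySem.List.pyRange_one_append lo mid hi (by omega) (by omega)]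

lemma selRem_spec : ∀ (t : OST), t.wf → ∀ (k : Int), 0 ≤ k → k < t.count →
    (selRem t k).2.wf ∧ t.alive[k.toNat]? = some (selRem t k).1 ∧
    (selRem t k).2.alive = t.alive.eraseIdx k.toNat := by
  intro t
  induction t with
  | leaf c v =>
    intro hw k h0 h1
    have hc : c = 1 := by rcases hw with h | h <;> simp [OST.count, h] at h1 ⊢ <;> omega
    have hk : k = 0 := by simp [OST.count, hc] at h1; omega
    subst hc hk
    simp [selRem, OST.alive, OST.wf]
  | node c l r ihl ihr =>
    intro hw k h0 h1
    obtain ⟨hc, hl, hr⟩ := (OST_wf_node c l r).1 hw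
    have hlen : l.count = (l.alive.length : Int) := count_eq_alive_length l hl
    rw [OST_count_node] at h1
    rw [selRem]
    by_cases hk : k < l.count
    · obtain ⟨w1, w2, w3⟩ := ihl hl k h0 hk
      simp only [hk, if_true]
      refine ⟨(OST_wf_node _ _ _).2 ⟨?_, w1, hr⟩, ?_, ?_⟩
      · have h5 := count_eq_alive_length _ w1
        have hkn : k.toNat < l.alive.length := by omega
        have hel : (l.alive.eraseIdx k.toNat).length = l.alive.length - 1 := by
          simp [List.length_eraseIdx, hkn]
        rw [h5, w3, hel, hc, hlen]
        omega
      · simp only [OST_alive_node]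
        rw [List.getElem?_append_left (by omega), w2]
      · simp only [OST_alive_node]
        rw [w3, List.eraseIdx_append_of_lt_length (by omega)]
    · have hk0 : 0 ≤ k - l.count := by omega
      have hk1 : k - l.count < r.count := by omega
      obtain ⟨w1, w2, w3⟩ := ihr hr (k - l.count) hk0 hk1
      simp only [hk, if_false]
      have hrlen : r.count = (r.alive.length : Int) := count_eq_alive_length r hr
      refine ⟨(OST_wf_node _ _ _).2 ⟨?_, hl, w1⟩, ?_, ?_⟩
      · have h5 := count_eq_alive_length _ w1
        have hkn : (k - l.count).toNat < r.alive.length := by omega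
        have hel : (r.alive.eraseIdx (k - l.count).toNat).length = r.alive.length - 1 := by
          simp [List.length_eraseIdx, hkn]
        rw [h5, w3, hel, hc, hlen]
        omega
      · simp only [OST_alive_node]
        rw [List.getElem?_append_right (by omega), ← w2]
        congr 1
        omega
      · simp only [OST_alive_node]
        rw [w3, List.eraseIdx_append_of_length_le (by omega)]
        congr 2
        omega

-- Python index normalisation: a valid (possibly negative) index is its mod by the length
lemma pyIdx_eq_mod (n : Nat) (i : Int) (h1 : -(n : Int) ≤ i) (h2 : i < (n : Int)) :
    PySem.List.pyIdx? n i = some (PySem.Int.mod i (n : Int)).toNat := by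
  have hn : 0 < (n : Int) := by omega
  have hdm := PySem.Int.floordiv_mul_add_mod i (n : Int)
  have hm0 := PySem.Int.mod_nonneg i hn
  have hm1 := PySem.Int.mod_lt i hn
  by_cases h : 0 ≤ i
  · have hq : PySem.Int.floordiv i (n : Int) = 0 :=
      (PySem.Int.floordiv_eq_iff_of_pos hn).2 (by omega)
    rw [hq] at hdm
    simp only [PySem.List.pyIdx?, h, if_true, h2, if_true]
    congr 1
    omega
  · have hq : PySem.Int.floordiv i (n : Int) = -1 :=
      (PySem.Int.floordiv_eq_iff_of_pos hn).2 (by omega)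
    rw [hq] at hdm
    simp only [PySem.List.pyIdx?, h, if_false, h1, if_true]
    congr 1
    omega

lemma pyGet_eq_mod (xs : List Int) (i : Int) (h1 : -(xs.length : Int) ≤ i)
    (h2 : i < (xs.length : Int)) :
    PySem.List.pyGet? xs i = xs[(PySem.Int.mod i (xs.length : Int)).toNat]? := by
  simp [PySem.List.pyGet?, pyIdx_eq_mod xs.length i h1 h2]

lemma pop_eq_mod (xs : List Int) (i : Int) (h1 : -(xs.length : Int) ≤ i)
    (h2 : i < (xs.length : Int)) :
    PySem.List.pop? xs i =
      (xs[(PySem.Int.mod i (xs.length : Int)).toNat]?).map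
        (fun x => (x, xs.eraseIdx (PySem.Int.mod i (xs.length : Int)).toNat)) := by
  simp [PySem.List.pop?, pyIdx_eq_mod xs.length i h1 h2]

-- the row (inner-loop) simulation: A's list state b is B's tree's alive list throughout
lemma row_eq (N base : Int) : ∀ (len : Nat) (k : Int) (b : List Int) (t : OST) (i : Int),
    b.length = len → 1 ≤ len → k = N + 1 - (len : Int) →
    t.wf → t.alive = b → (∀ x ∈ b, 0 ≤ x ∧ x < N) →
    -(len : Int) ≤ i → i < (len : Int) →
    ∃ J : List Int,
      (∀ ci kl, rowA N (PySem.List.pyRange k (N + 1) 1) b ci i (base + (k - 1)) kl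
          = (ci ++ J, base + N, N)) ∧
      (∀ ci, ((PySem.List.pyRange k (N + 1) 1).foldl (rowBstep N base) (t, ci, i)).2.1
          = ci ++ J) ∧
      J.length = len ∧ (∀ x ∈ J, 0 ≤ x ∧ x < N) := by
  intro len
  induction len with
  | zero => intro _ _ _ _ _ _ h; omega
  | succ n ihn =>
    intro k b t i hb hlen hk hwf hal hmem hi1 hi2
    push_cast at hk hi1 hi2
    have hkN : k ≤ N := by omega
    have hbI : (b.length : Int) = (n : Int) + 1 := by omega
    have hcons : PySem.List.pyRange k (N + 1) 1 = k :: PySem.List.pyRange (k + 1) (N + 1) 1 :=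
      PySem.List.pyRange_one_cons (by omega)
    set mm := PySem.Int.mod i ((n : Int) + 1) with hmm
    have hm0 : 0 ≤ mm := PySem.Int.mod_nonneg i (by omega)
    have hm1 : mm < (n : Int) + 1 := PySem.Int.mod_lt i (by omega)
    set m := mm.toNat with hmdef
    have hmlt : m < b.length := by omega
    have hsome : b[m]? = some b[m] := List.getElem?_eq_getElem hmlt
    have hget : PySem.List.pyGet? b i = some b[m] := by
      rw [pyGet_eq_mod b i (by omega) (by omega), hbI, ← hmm, ← hmdef, hsome]
    have hpop : PySem.List.pop? b i = some (b[m], b.eraseIdx m) := by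
      rw [pop_eq_mod b i (by omega) (by omega), hbI, ← hmm, ← hmdef, hsome, Option.map_some]
    have hcount : t.count = (n : Int) + 1 := by
      rw [count_eq_alive_length t hwf, hal]; omega
    obtain ⟨w1, w2, w3⟩ := selRem_spec t hwf mm hm0 (by omega)
    rw [hal, ← hmdef] at w2 w3
    have hval : (selRem t mm).1 = b[m] := by
      rw [hsome] at w2; exact (Option.some.inj w2).symm
    have hNk1 : N - k + 1 = (n : Int) + 1 := by omega
    have hblen' : (b.eraseIdx m).length = n := by
      simp [List.length_eraseIdx, hmlt]
      omega
    rcases Nat.eq_zero_or_pos n with hn | hn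
    · -- last iteration: b empties, A breaks, B's remaining range is empty
      have hkN' : k = N := by omega
      refine ⟨[b[m]], ?_, ?_, by simp [hn], ?_⟩
      · intro ci kl
        rw [hcons]
        simp only [rowA, hget, hpop]
        rw [if_pos (by simp [PySem.List.len_eq, hblen', hn])]
        rw [show base + (k - 1) + 1 = base + N from by omega, hkN']
      · intro ci
        rw [hcons]
        simp only [List.foldl_cons, rowBstep, hNk1, ← hmm, hval]
        rw [PySem.List.pyRange_one_eq_nil (by omega)]
        simp
      · intro x hx
        rw [List.mem_singleton] at hx
        subst hx
        exact hmem _ (List.getElem_mem hmlt)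
    · -- b stays nonempty: one step, then the induction hypothesis
      have hkN' : k < N := by omega
      set i' := PySem.Int.mod ((i - 1) + base + (k - 1)) (N - k) with hi'
      have hi'0 : 0 ≤ i' := PySem.Int.mod_nonneg _ (by omega)
      have hi'1 : i' < N - k := PySem.Int.mod_lt _ (by omega)
      obtain ⟨J', hA, hB, hlen', hmem'⟩ :=
        ihn (k + 1) (b.eraseIdx m) (selRem t mm).2 i' hblen' (by omega) (by push_cast; omega)
          w1 w3 (fun x hx => hmem x (List.eraseIdx_subset hx))
          (by push_cast; omega) (by push_cast; omega)
      refine ⟨b[m] :: J', ?_, ?_, by simp [hlen'], ?_⟩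
      · intro ci kl
        rw [hcons]
        simp only [rowA, hget, hpop]
        rw [if_neg (by simp [PySem.List.len_eq, hblen']; omega)]
        rw [show (i - 1) + (base + (k - 1)) = (i - 1) + base + (k - 1) from by ring, ← hi']
        rw [show base + (k - 1) + 1 = base + ((k + 1) - 1) from by ring]
        rw [hA (ci ++ [b[m]]) k, List.append_assoc]
        rfl
      · intro ci
        rw [hcons]
        simp only [List.foldl_cons, rowBstep, hNk1, ← hmm, hval]
        rw [if_pos hkN', ← hi', hB (ci ++ [b[m]]), List.append_assoc]
        rfl
      · intro x hx
        rcases List.mem_cons.1 hx with hx | hx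
        · subst hx; exact hmem _ (List.getElem_mem hmlt)
        · exact hmem' x hx

-- the outer loop: col_lst states coincide; A's threaded NStep is NStep + r * N at row r
lemma outer_eq (N NStep : Int) (hN : 1 ≤ N) :
    ∀ (cnt : Nat) (r tmp : Int) (col : List (List Int)), -N ≤ tmp → tmp < N →
      ((PySem.List.pyRange r (r + (cnt : Int)) 1).foldl (outerA N) (tmp, NStep + r * N, col)).2.2
        = ((PySem.List.pyRange r (r + (cnt : Int)) 1).foldl (outerB N NStep) (tmp, col)).2 := by
  intro cnt
  induction cnt with
  | zero =>
    intro r tmp col _ _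
    rw [PySem.List.pyRange_one_eq_nil (by omega)]
    rfl
  | succ n ih =>
    intro r tmp col h1 h2
    rw [PySem.List.pyRange_one_cons (by push_cast; omega)]
    simp only [List.foldl_cons]
    obtain ⟨hwf, hal⟩ := build_spec (N - 0).toNat 0 N rfl (by omega)
    obtain ⟨J, hA, hB, hlen, hmem⟩ :=
      row_eq N (NStep + r * N) N.toNat 1 (PySem.List.pyRange 0 N 1) (buildOST 0 N) tmp
        (by rw [PySem.List.length_pyRange_one]; omega) (by omega) (by push_cast; omega)
        hwf hal (fun x hx => by rw [PySem.List.mem_pyRange_one] at hx; omega)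
        (by push_cast; omega) (by push_cast; omega)
    have hJne : J ≠ [] := by
      intro h; rw [h] at hlen; simp at hlen; omega
    have hgl : PySem.List.pyGetD J (N - 1) 0 = PySem.List.pyGetD J (-1) 0 := by
      rw [PySem.List.pyGetD_neg_one J 0 hJne,
          PySem.List.pyGetD_eq_getElem J 0 (by omega) (by omega : N - 1 < (J.length : Int)),
          List.getLast_eq_getElem]
      congr 1
      omega
    have hlast : PySem.List.pyGetD J (-1) 0 ∈ J := by
      rw [PySem.List.pyGetD_neg_one J 0 hJne]
      exact List.getLast_mem hJne
    have hstepA : outerA N (tmp, NStep + r * N, col) r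
        = (PySem.List.pyGetD J (-1) 0 - 1, NStep + (r + 1) * N, col ++ [J]) := by
      simp only [outerA]
      rw [show NStep + r * N = NStep + r * N + (1 - 1) from by ring, hA [] 0]
      simp only [List.nil_append]
      rw [hgl, show NStep + r * N + N = NStep + (r + 1) * N from by ring]
    have hstepB : (outerB N NStep (tmp, col) r).2 = col ++ [J] ∧
        (outerB N NStep (tmp, col) r).1 = PySem.List.pyGetD J (-1) 0 - 1 := by
      simp only [outerB]
      rw [hB []]
      simp
    have hrng : r + ((n : Int) + 1) = (r + 1) + (n : Int) := by ring
    have hbnd := hmem _ hlast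
    have hOB : outerB N NStep (tmp, col) r = (PySem.List.pyGetD J (-1) 0 - 1, col ++ [J]) :=
      Prod.ext hstepB.2 hstepB.1
    push_cast
    rw [hrng, hstepA, hOB]
    exact ih (r + 1) (PySem.List.pyGetD J (-1) 0 - 1) (col ++ [J]) (by omega) (by omega)

-- ===== VERDICT (by name: the statement is the Claim_ definition above) =====
theorem JS_generate_column_sequence_spec : Claim_equal_JS_generate_column_sequence := by
  intro M N NP NStep _hdom hpre
  unfold Spec_JS_generate_column_sequence
  unfold JS_generate_column_sequence JS_generate_column_sequence_alt
  by_cases hM : M ≤ 0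
  · rw [PySem.List.pyRange_one_eq_nil hM]
    rfl
  · rcases hpre with h | ⟨hN, h1, h2⟩
    · omega
    · have hM' : (0 : Int) + (M.toNat : Int) = M := by omega
      have := outer_eq N NStep hN M.toNat 0 (NP - 1) [] (by omega) (by omega)
      rw [hM'] at this
      rw [show NStep + 0 * N = NStep from by ring] at this
      exact this
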